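-- pv_equiv track=rewrite | github.com/uray-lu/codility | 10.4***Peaks.py | solution
-- ===== SOURCE A (Python) =====
-- def solution(A):
--
--
--
--     peak = []
--     for i in range(1,len(A)-1):
--
--         if A[i-1]<A[i] and A[i]>A[i+1]:
--             peak.append(i)
--
--     if len(peak) == 0:
--         return 0
--
--     for k in range(len(peak), 0 , -1):
--         if len(A)%k != 0:
--             continue
--
--         LenEachSlice = int(len(A)/k)
--         slices = [0]*k
--
--         #無條件捨去的商就會是落在分段完成後的第幾段
--         for p in peak:
--             slice_id = p//LenEachSlice
--             if slices[slice_id] == 0: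
--                 slices[slice_id] =1
--
--         if sum(slices) == k:
--             return k
--     return 0
-- ===== SOURCE B (Python) =====
-- def solution(A):
--     n = len(A)
--     # prefix counts: pref[j] = number of peak positions < j
--     pref = [0]
--     for i in range(n):
--         is_peak = 1 if 0 < i < n - 1 and A[i - 1] < A[i] and A[i] > A[i + 1] else 0
--         pref.append(pref[-1] + is_peak)
--     best = 0
--     for k in range(1, pref[n] + 1):
--         if n % k == 0:
--             L = n // k
--             if all(pref[(b + 1) * L] > pref[b * L] for b in range(k)):
--                 best = k
--     return best
-- ===== Notes on version B (the rewrite author's own statement) =====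
-- stated objective: alternative
-- what changed: Replaces A's per-candidate marking pass over the whole peak list (a slice array filled via floor-division and then summed) by a single prefix-sum of peak counts, verifying each divisor k by comparing prefix values at the k block boundaries, scanning candidates upward and keeping the best.
import Mathlib
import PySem

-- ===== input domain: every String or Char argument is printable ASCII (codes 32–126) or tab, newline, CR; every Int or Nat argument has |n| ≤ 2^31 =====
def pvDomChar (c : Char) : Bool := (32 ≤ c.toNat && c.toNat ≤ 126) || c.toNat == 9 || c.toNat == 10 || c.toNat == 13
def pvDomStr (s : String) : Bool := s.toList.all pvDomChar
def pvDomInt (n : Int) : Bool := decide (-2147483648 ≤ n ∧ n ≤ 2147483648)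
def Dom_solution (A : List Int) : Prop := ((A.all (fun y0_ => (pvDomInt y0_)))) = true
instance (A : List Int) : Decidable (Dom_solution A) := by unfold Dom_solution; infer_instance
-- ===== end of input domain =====

-- B replaces A's per-candidate marking pass over the whole peak list by a one-pass
-- prefix-sum of peak counts, checking each divisor's blocks at their boundaries
-- (an alternative algorithm of similar cost).

-- ===== PORT A =====
-- peak condition A[i-1] < A[i] > A[i+1]; indices 1..len-2 are always in range
def pvIsPk (A : List Int) (i : Nat) : Bool :=
  decide (A.getD (i-1) 0 < A.getD i 0) && decide (A.getD i 0 > A.getD (i+1) 0)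

-- for i in range(1, len(A)-1): if cond: peak.append(i)
def pvPeaksA (A : List Int) : List Nat :=
  (List.range' 1 (A.length - 2)).filter (pvIsPk A)

-- for p in peak: slice_id = p // LenEachSlice; if slices[slice_id]==0: slices[slice_id]=1
def pvMark (L : Nat) (peaks : List Nat) (slices : List Int) : List Int :=
  peaks.foldl (fun s p =>
    if s.getD (p / L) 0 = 0 then s.set (p / L) 1 else s) slices

-- for k in range(len(peak), 0, -1): skip non-divisors; mark slices; return k if sum==k
def pvLoopA (n : Nat) (peaks : List Nat) : Nat → Int
  | 0 => 0
  | k+1 =>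
    if n % (k+1) ≠ 0 then pvLoopA n peaks k
    else
      let slices := pvMark (n / (k+1)) peaks (List.replicate (k+1) (0:Int))
      if slices.sum = ((k:Int)+1) then ((k:Int)+1) else pvLoopA n peaks k

def solution (A : List Int) : Int :=
  let peaks := pvPeaksA A
  if peaks.length = 0 then 0
  else pvLoopA A.length peaks peaks.length

-- ===== PORT B =====
-- is_peak = 1 if 0 < i < n-1 and A[i-1] < A[i] and A[i] > A[i+1] else 0
def pvIndB (A : List Int) (i : Nat) : Nat :=
  if 0 < i ∧ i < A.length - 1 ∧ A.getD (i-1) 0 < A.getD i 0 ∧ A.getD i 0 > A.getD (i+1) 0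
  then 1 else 0

-- pref = [0]; for i in range(n): pref.append(pref[-1] + is_peak)
def pvPref (A : List Int) : List Nat :=
  (List.range A.length).foldl (fun l i => l ++ [l.getLastD 0 + pvIndB A i]) [0]

-- for k in range(1, pref[n]+1): if n%k==0 and all blocks gain a peak: best = k
def solution_alt (A : List Int) : Int :=
  let n := A.length
  let pref := pvPref A
  (List.range' 1 (pref.getD n 0)).foldl
    (fun best k =>
      if n % k = 0 then
        let L := n / k
        if (List.range k).all (fun b => pref.getD ((b+1)*L) 0 > pref.getD (b*L) 0)
        then (k:Int) else best
      else best) 0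

-- ===== PRECONDITION & SPEC =====
def Spec_solution (A : List Int) (out : Int) : Prop := out = solution_alt A
instance (A : List Int) (out : Int) : Decidable (Spec_solution A out) := by unfold Spec_solution; infer_instance

-- ===== CLAIM (what is proved, stated in full; the proofs are below) =====
def Claim_equal_solution : Prop := ∀ (A : List Int), Dom_solution A → Spec_solution A (solution A)

-- ===== LEMMAS AND PROOFS =====

-- counting function characterizing B's prefix list
def pvCnt (A : List Int) (j : Nat) : Nat := ((List.range j).map (pvIndB A)).sum

-- generic "last success scanning k = 1, …, P upward = first success downward"
def pvDescend (ok : Nat → Bool) : Nat → Int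
  | 0 => 0
  | k+1 => if ok (k+1) then ((k+1 : Nat) : Int) else pvDescend ok k

def pvOkA (A : List Int) (k : Nat) : Bool :=
  (A.length % k == 0) &&
    ((pvMark (A.length / k) (pvPeaksA A) (List.replicate k (0:Int))).sum == (k : Int))

def pvOkB (A : List Int) (k : Nat) : Bool :=
  (A.length % k == 0) &&
    (List.range k).all (fun b =>
      (pvPref A).getD ((b+1)*(A.length/k)) 0 > (pvPref A).getD (b*(A.length/k)) 0)

theorem pvIndB_le_one (A : List Int) (i : Nat) : pvIndB A i ≤ 1 := by
  unfold pvIndB; split <;> omega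

theorem pvCnt_succ (A : List Int) (j : Nat) :
    pvCnt A (j+1) = pvCnt A j + pvIndB A j := by
  simp [pvCnt, List.range_succ]

theorem pvPref_foldl (A : List Int) (m : Nat) :
    (List.range m).foldl (fun l i => l ++ [l.getLastD 0 + pvIndB A i]) [0]
      = (List.range (m+1)).map (pvCnt A) := by
  induction m with
  | zero => simp [pvCnt]
  | succ m ih =>
    rw [List.range_succ, List.foldl_append, ih]
    have hlast : ((List.range (m+1)).map (pvCnt A)).getLastD 0 = pvCnt A m := by
      rw [List.range_succ, List.map_append]
      simp
    simp only [List.foldl_cons, List.foldl_nil]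
    rw [hlast, List.range_succ (n := m+1), List.map_append]
    simp [pvCnt_succ]

theorem pvPref_eq (A : List Int) :
    pvPref A = (List.range (A.length+1)).map (pvCnt A) := pvPref_foldl A A.length

theorem pvPref_getD (A : List Int) {j : Nat} (hj : j ≤ A.length) :
    (pvPref A).getD j 0 = pvCnt A j := by
  rw [pvPref_eq, List.getD_eq_getElem?_getD, List.getElem?_map,
      List.getElem?_range (by omega)]
  simp

theorem pvCnt_mono (A : List Int) {x y : Nat} (h : x ≤ y) : pvCnt A x ≤ pvCnt A y := by
  induction y, h using Nat.le_induction with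
  | base => exact le_refl _
  | succ y hxy ih => rw [pvCnt_succ]; omega

theorem pvCnt_lt_iff (A : List Int) {x y : Nat} (h : x ≤ y) :
    (pvCnt A x < pvCnt A y ↔ ∃ i, x ≤ i ∧ i < y ∧ pvIndB A i = 1) := by
  induction y, h using Nat.le_induction with
  | base =>
    constructor
    · omega
    · rintro ⟨i, h1, h2, _⟩; omega
  | succ y hxy ih =>
    have h1 := pvIndB_le_one A y
    have h2 := pvCnt_mono A hxy
    rw [pvCnt_succ]
    constructor
    · intro hlt
      by_cases hy : pvIndB A y = 1
      · exact ⟨y, hxy, by omega, hy⟩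
      · obtain ⟨i, hi1, hi2, hi3⟩ := ih.mp (by omega)
        exact ⟨i, hi1, by omega, hi3⟩
    · rintro ⟨i, hi1, hi2, hi3⟩
      by_cases hiy : i = y
      · subst hiy; omega
      · have : pvCnt A x < pvCnt A y := ih.mpr ⟨i, hi1, by omega, hi3⟩
        omega

theorem pvIndB_one_iff (A : List Int) (i : Nat) :
    pvIndB A i = 1 ↔ i ∈ pvPeaksA A := by
  unfold pvIndB pvPeaksA pvIsPk
  rw [List.mem_filter, List.mem_range'_1]
  constructor
  · intro h
    split at h
    · rename_i hc
      refine ⟨⟨by omega, by omega⟩, ?_⟩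
      simp only [Bool.and_eq_true, decide_eq_true_eq]
      exact ⟨hc.2.2.1, hc.2.2.2⟩
    · omega
  · rintro ⟨⟨hb1, hb2⟩, hpk⟩
    simp only [Bool.and_eq_true, decide_eq_true_eq] at hpk
    rw [if_pos ⟨by omega, by omega, hpk.1, hpk.2⟩]

theorem pvPeaks_lt (A : List Int) {p : Nat} (hp : p ∈ pvPeaksA A) :
    1 ≤ p ∧ p < A.length - 1 ∧ 3 ≤ A.length := by
  unfold pvPeaksA at hp
  rw [List.mem_filter, List.mem_range'_1] at hp
  omega

theorem pvCnt_eq_countP (A : List Int) (j : Nat) :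
    pvCnt A j = (List.range j).countP (fun i => pvIndB A i == 1) := by
  induction j with
  | zero => simp [pvCnt]
  | succ j ih =>
    rw [pvCnt_succ, List.range_succ, List.countP_append, ih]
    have := pvIndB_le_one A j
    by_cases h : pvIndB A j = 1 <;> simp [h] <;> omega

theorem pvCnt_total (A : List Int) : pvCnt A A.length = (pvPeaksA A).length := by
  rw [pvCnt_eq_countP]
  have hlen : (pvPeaksA A).length = (List.range' 1 (A.length-2)).countP (pvIsPk A) := by
    rw [pvPeaksA, List.countP_eq_length_filter]
  rw [hlen]
  by_cases hn : A.length ≤ 2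
  · interval_cases h : A.length <;> simp [pvIndB, List.range_succ] <;> omega
  · push_neg at hn
    have hd : List.range A.length
        = (List.range' 0 1 ++ List.range' 1 (A.length - 2)) ++ List.range' (A.length - 1) 1 := by
      rw [List.range_eq_range']
      conv_lhs => rw [show A.length = (1 + (A.length-2)) + 1 from by omega]
      conv_lhs => rw [← List.range'_append, ← List.range'_append]
      norm_num
      congr 1
      omega
    rw [hd, List.countP_append, List.countP_append]
    have h0 : (List.range' 0 1).countP (fun i => pvIndB A i == 1) = 0 := by
      simp [pvIndB]
    have h1 : (List.range' (A.length-1) 1).countP (fun i => pvIndB A i == 1) = 0 := by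
      simp [pvIndB]
      try omega
    have hmid : (List.range' 1 (A.length-2)).countP (fun i => pvIndB A i == 1)
        = (List.range' 1 (A.length-2)).countP (pvIsPk A) := by
      apply List.countP_congr
      intro i hi
      rw [List.mem_range'_1] at hi
      have hb1 : 0 < i := by omega
      have hb2 : i < A.length - 1 := by omega
      rcases Decidable.em (A.getD (i-1) 0 < A.getD i 0) with hp1 | hp1 <;>
        rcases Decidable.em (A.getD i 0 > A.getD (i+1) 0) with hp2 | hp2 <;>
        simp [pvIndB, pvIsPk, hb1, hb2, hp1, hp2]
    omega

-- marking lemma: folding A's marking step over ps on an indicator list yields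
-- the indicator list of "already marked or hit by some p/L"
theorem pvMark_map (L k : Nat) :
    ∀ (ps : List Nat) (g : Nat → Bool), (∀ p ∈ ps, p / L < k) →
    pvMark L ps ((List.range k).map (fun b => if g b then (1:Int) else 0)) =
      (List.range k).map
        (fun b => if (g b || ps.any (fun p => p / L == b)) then (1:Int) else 0) := by
  intro ps
  induction ps with
  | nil => intro g _; simp [pvMark]
  | cons p ps ih =>
    intro g hps
    have hpk : p / L < k := hps p (by simp)
    have hget : ((List.range k).map (fun b => if g b then (1:Int) else 0)).getD (p / L) 0
        = if g (p / L) then (1:Int) else 0 := by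
      rw [List.getD_eq_getElem?_getD, List.getElem?_map, List.getElem?_range hpk]
      simp
    rw [pvMark, List.foldl_cons, ← pvMark]
    by_cases hg : g (p / L)
    · rw [if_neg (by rw [hget]; simp [hg])]
      rw [ih g (fun q hq => hps q (by simp [hq]))]
      apply List.map_congr_left
      intro b hb
      by_cases hgb : g b
      · simp [hgb]
      · have : (p / L == b) = false := by
          simp only [beq_eq_false_iff_ne]
          intro hE; rw [hE] at hg; exact hgb hg
        simp [hgb, this]
    · rw [if_pos (by rw [hget]; simp [hg])]
      have hset : ((List.range k).map (fun b => if g b then (1:Int) else 0)).set (p / L) 1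
          = (List.range k).map (fun b => if (g b || (p / L == b)) then (1:Int) else 0) := by
        apply List.ext_getElem
        · simp
        · intro j hj1 hj2
          simp only [List.getElem_set, List.getElem_map, List.getElem_range] at *
          by_cases hjp : p / L = j
          · simp [hjp]
          · have : (p / L == j) = false := by simp [hjp]
            simp [hjp, this]
      rw [hset, ih _ (fun q hq => hps q (by simp [hq]))]
      apply List.map_congr_left
      intro b hb
      have : (g b || (p :: ps).any (fun q => q / L == b))
            = ((g b || (p / L == b)) || ps.any (fun q => q / L == b)) := by
        simp [List.any_cons]
        cases g b <;> cases (p / L == b) <;> simp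
      rw [this]

theorem pvReplicate_map (k : Nat) :
    (List.replicate k (0:Int)) = (List.range k).map (fun b => if (false : Bool) then (1:Int) else 0) := by
  simp [List.map_const', List.eq_replicate_iff]

theorem pvSum_map_le (k : Nat) (f : Nat → Bool) :
    ((List.range k).map (fun b => if f b then (1:Int) else 0)).sum ≤ k := by
  induction k with
  | zero => simp
  | succ k ih =>
    rw [List.range_succ, List.map_append, List.sum_append]
    by_cases h : f k <;> simp [h] <;> push_cast <;> omega

theorem pvSum_map_iff (k : Nat) (f : Nat → Bool) :
    (((List.range k).map (fun b => if f b then (1:Int) else 0)).sum = (k:Int))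
      ↔ ∀ b < k, f b = true := by
  induction k with
  | zero => simp
  | succ k ih =>
    rw [List.range_succ, List.map_append, List.sum_append]
    have hle := pvSum_map_le k f
    constructor
    · intro h
      by_cases hk : f k
      · simp [hk] at h
        intro b hb
        rcases Nat.lt_succ_iff_lt_or_eq.mp hb with hb | hb
        · exact (ih.mp (by push_cast at h ⊢; omega)) b hb
        · rw [hb]; exact hk
      · simp [hk] at h
        push_cast at h hle
        omega
    · intro h
      have hk : f k = true := h k (by omega)
      have : ((List.range k).map (fun b => if f b then (1:Int) else 0)).sum = (k:Int) :=
        ih.mpr (fun b hb => h b (by omega))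
      simp [hk, this]

theorem pvOk_eq (A : List Int) (k : Nat) (hn : 0 < A.length) (hk : 1 ≤ k) :
    pvOkA A k = pvOkB A k := by
  rw [Bool.eq_iff_iff]
  unfold pvOkA pvOkB
  simp only [Bool.and_eq_true, beq_iff_eq]
  by_cases hdvd : A.length % k = 0
  · have hkdvd : k ∣ A.length := Nat.dvd_of_mod_eq_zero hdvd
    have hkle : k ≤ A.length := Nat.le_of_dvd hn hkdvd
    have hL : 0 < A.length / k := Nat.div_pos hkle (by omega)
    have hkL : k * (A.length / k) = A.length := Nat.mul_div_cancel' hkdvd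
    set L := A.length / k with hLdef
    have hbound : ∀ p ∈ pvPeaksA A, p / L < k := by
      intro p hp
      have h3 := pvPeaks_lt A hp
      rw [Nat.div_lt_iff_lt_mul hL, hkL]
      omega
    -- A-side check ↔ coverage by p/L
    have hA : ((pvMark L (pvPeaksA A) (List.replicate k (0:Int))).sum = (k:Int))
        ↔ ∀ b < k, (pvPeaksA A).any (fun p => p / L == b) = true := by
      rw [pvReplicate_map, pvMark_map L k (pvPeaksA A) _ hbound]
      rw [pvSum_map_iff]
      constructor
      · intro h b hb
        have := h b hb
        simpa using this
      · intro h b hb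
        simpa using h b hb
    -- B-side check ↔ a peak inside each block
    have hB : ((List.range k).all (fun b =>
          (pvPref A).getD ((b+1)*L) 0 > (pvPref A).getD (b*L) 0) = true)
        ↔ ∀ b < k, (pvPeaksA A).any (fun p => p / L == b) = true := by
      rw [List.all_eq_true]
      constructor
      · intro h b hb
        have hble : (b+1) * L ≤ A.length := by
          calc (b+1) * L ≤ k * L := Nat.mul_le_mul_right L (by omega)
          _ = A.length := hkL
        have hmul : b * L ≤ (b+1) * L := by nlinarith
        have := h b (List.mem_range.mpr hb)
        simp only [decide_eq_true_eq] at this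
        rw [pvPref_getD A (j := (b+1)*L) hble, pvPref_getD A (j := b*L) (le_trans hmul hble)] at this
        obtain ⟨i, hi1, hi2, hi3⟩ := (pvCnt_lt_iff A hmul).mp this
        rw [List.any_eq_true]
        refine ⟨i, (pvIndB_one_iff A i).mp hi3, ?_⟩
        simp only [beq_iff_eq]
        exact Nat.div_eq_of_lt_le hi1 hi2
      · intro h b hbmem
        rw [List.mem_range] at hbmem
        obtain ⟨p, hpmem, hpb⟩ := List.any_eq_true.mp (h b hbmem)
        simp only [beq_iff_eq] at hpb
        have hble : (b+1) * L ≤ A.length := by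
          calc (b+1) * L ≤ k * L := Nat.mul_le_mul_right L (by omega)
          _ = A.length := hkL
        have hmul : b * L ≤ (b+1) * L := by nlinarith
        simp only [decide_eq_true_eq]
        rw [pvPref_getD A (j := (b+1)*L) hble, pvPref_getD A (j := b*L) (le_trans hmul hble)]
        rw [gt_iff_lt, pvCnt_lt_iff A hmul]
        refine ⟨p, ?_, ?_, (pvIndB_one_iff A p).mpr hpmem⟩
        · rw [← hpb]; exact Nat.div_mul_le_self p L
        · rw [← hpb]; nlinarith [Nat.div_add_mod p L, Nat.mod_lt p hL]
    rw [hA, hB]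
  · simp [hdvd]

theorem pvLoopA_eq_descend (A : List Int) :
    ∀ k, pvLoopA A.length (pvPeaksA A) k = pvDescend (pvOkA A) k := by
  intro k
  induction k with
  | zero => rfl
  | succ k ih =>
    have hcast : (((k+1 : Nat)) : Int) = (k:Int)+1 := by push_cast; ring
    by_cases hdvd : A.length % (k+1) = 0
    · rw [pvLoopA, if_neg (by simp [hdvd])]
      by_cases hsum : (pvMark (A.length / (k+1)) (pvPeaksA A) (List.replicate (k+1) (0:Int))).sum = ((k:Int)+1)
      · rw [if_pos hsum, pvDescend,
            if_pos (by unfold pvOkA; rw [Bool.and_eq_true]; simp [hdvd, hcast, hsum]), hcast]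
      · rw [if_neg hsum, ih, pvDescend,
            if_neg (by unfold pvOkA; rw [Bool.and_eq_true]; simp [hdvd, hcast, hsum])]
    · rw [pvLoopA, if_pos hdvd, ih, pvDescend,
          if_neg (by unfold pvOkA; rw [Bool.and_eq_true]; simp [hdvd])]

theorem pvFoldl_eq_descend (ok : Nat → Bool) :
    ∀ P, (List.range' 1 P).foldl (fun best k => if ok k then (k:Int) else best) 0
      = pvDescend ok P := by
  intro P
  induction P with
  | zero => rfl
  | succ P ih =>
    rw [List.range'_concat, List.foldl_append, ih]
    simp only [List.foldl_cons, List.foldl_nil, pvDescend]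
    have hc : 1 + 1 * P = P + 1 := by omega
    rw [hc]

theorem pvDescend_congr (ok1 ok2 : Nat → Bool)
    (h : ∀ k, 1 ≤ k → ok1 k = ok2 k) :
    ∀ P, pvDescend ok1 P = pvDescend ok2 P := by
  intro P
  induction P with
  | zero => rfl
  | succ P ih => rw [pvDescend, pvDescend, h (P+1) (by omega), ih]

theorem pvAlt_eq_descend (A : List Int) :
    solution_alt A = pvDescend (pvOkB A) (pvPeaksA A).length := by
  unfold solution_alt
  have htot : (pvPref A).getD A.length 0 = (pvPeaksA A).length := by
    rw [pvPref_getD A (le_refl _), pvCnt_total]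
  simp only [htot]
  have hstep : (fun (best : Int) (k : Nat) =>
      if A.length % k = 0 then
        if (List.range k).all (fun b =>
            (pvPref A).getD ((b+1)*(A.length/k)) 0 > (pvPref A).getD (b*(A.length/k)) 0)
        then (k:Int) else best
      else best)
      = fun (best : Int) (k : Nat) => if pvOkB A k then (k:Int) else best := by
    funext best k
    unfold pvOkB
    by_cases h1 : A.length % k = 0
    · by_cases h2 : (List.range k).all (fun b =>
          (pvPref A).getD ((b+1)*(A.length/k)) 0 > (pvPref A).getD (b*(A.length/k)) 0)
      · simp [h1, h2]
      · simp [h1, h2]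
    · simp [h1]
  rw [hstep, pvFoldl_eq_descend]

theorem pvSolution_eq (A : List Int) :
    solution A = (if (pvPeaksA A).length = 0 then 0
      else pvLoopA A.length (pvPeaksA A) (pvPeaksA A).length) := rfl

-- ===== VERDICT (by name: the statement is the Claim_ definition above) =====
theorem solution_spec : Claim_equal_solution := by
  intro A _
  unfold Spec_solution
  rw [pvSolution_eq, pvAlt_eq_descend]
  by_cases hpe : (pvPeaksA A).length = 0
  · rw [if_pos hpe, hpe]
    rfl
  · rw [if_neg hpe, pvLoopA_eq_descend]
    have hn : 0 < A.length := by
      obtain ⟨p, hp⟩ := List.exists_mem_of_length_pos (by omega : 0 < (pvPeaksA A).length)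
      have := pvPeaks_lt A hp
      omega
    exact pvDescend_congr (pvOkA A) (pvOkB A) (fun k hk => pvOk_eq A k hn hk) _
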